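-- pv_equiv track=rewrite | github.com/vinithbraj/openfabric | src/aor_runtime/runtime/response_renderer.py | _normalize_whitespace_outside_quotes
-- ===== SOURCE A (Python) =====
-- def _normalize_whitespace_outside_quotes(value: str) -> str:
--     """Handle the internal normalize whitespace outside quotes helper path for this module.
--
--     Inputs:
--         Receives value for this function; type hints and validators define accepted shapes.
--
--     Returns:
--         Returns the computed value described by the function name and type hints.
--
--     Used by:
--         Used by planning, execution, validation, and presentation code paths that import or call aor_runtime.runtime.response_renderer._normalize_whitespace_outside_quotes.
--     """
--     text = str(value or "")
--     result: list[str] = []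
--     quote: str | None = None
--     escaped = False
--     pending_space = False
--     for char in text:
--         if escaped:
--             if pending_space and quote is None and result:
--                 result.append(" ")
--                 pending_space = False
--             result.append(char)
--             escaped = False
--             continue
--         if char == "\\":
--             if pending_space and quote is None and result:
--                 result.append(" ")
--                 pending_space = False
--             result.append(char)
--             escaped = True
--             continue
--         if char in {"'", '"'}:
--             if pending_space and quote is None and result:
--                 result.append(" ")
--                 pending_space = False
--             if quote is None:
--                 quote = char
--             elif quote == char:
--                 quote = None
--             result.append(char)
--             continue
--         if quote is None and char.isspace():
--             pending_space = bool(result)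
--             continue
--         if pending_space and quote is None and result:
--             result.append(" ")
--             pending_space = False
--         result.append(char)
--     return "".join(result).strip()
-- ===== SOURCE B (Python) =====
-- def _normalize_whitespace_outside_quotes(value: str) -> str:
--     """Split the text into content chunks (quote/escape aware), then join with single spaces."""
--     text = str(value or "")
--     chunks = []
--     cur = []
--     quote = None
--     i = 0
--     n = len(text)
--     while i < n:
--         c = text[i]
--         if quote is None and c.isspace():
--             if cur:
--                 chunks.append("".join(cur))
--                 cur = []
--             i += 1
--             continue
--         if c == "\\":
--             cur.append(c)
--             if i + 1 < n:
--                 cur.append(text[i + 1])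
--                 i += 2
--             else:
--                 i += 1
--             continue
--         if c in "'\"":
--             if quote is None:
--                 quote = c
--             elif quote == c:
--                 quote = None
--         cur.append(c)
--         i += 1
--     if cur:
--         chunks.append("".join(cur))
--     return " ".join(chunks).strip()
-- ===== Notes on version B (the rewrite author's own statement) =====
-- stated objective: alternative
-- what changed: A's single char-by-char state machine with escaped/pending_space flags is replaced by a two-phase decomposition: one quote/escape-aware index walk that consumes escape pairs whole and splits the text into content chunks, then the chunks are joined with single spaces and stripped.
import Mathlib
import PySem

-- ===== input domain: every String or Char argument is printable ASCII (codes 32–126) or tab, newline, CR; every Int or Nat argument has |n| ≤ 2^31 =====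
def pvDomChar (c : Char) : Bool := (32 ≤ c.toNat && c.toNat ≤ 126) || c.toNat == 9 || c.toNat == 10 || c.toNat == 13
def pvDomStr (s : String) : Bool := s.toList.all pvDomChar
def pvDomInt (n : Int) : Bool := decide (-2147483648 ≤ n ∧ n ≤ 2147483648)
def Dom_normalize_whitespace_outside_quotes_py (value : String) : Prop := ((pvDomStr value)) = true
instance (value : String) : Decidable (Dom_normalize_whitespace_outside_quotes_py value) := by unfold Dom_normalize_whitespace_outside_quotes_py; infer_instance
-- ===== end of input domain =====

-- B replaces A's char-by-char pending-space state machine by a two-phase decomposition: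
-- split into content chunks (quote/escape aware), then " ".join(chunks).strip(); same return value.

-- ===== PORT A =====
-- the three-line "if pending_space and quote is None and result: append ' '; pending_space = False" block
def pvAFlush (result : List Char) (pending : Bool) (quote : Option Char) : List Char × Bool :=
  if pending && quote == none && !result.isEmpty then (result ++ [' '], false) else (result, pending)

-- the for-loop over text, state (result, quote, escaped, pending_space)
def pvAGo : List Char → List Char → Option Char → Bool → Bool → List Char
  | [], result, _, _, _ => result
  | c :: rest, result, quote, escaped, pending =>
    if escaped then
      let (result, pending) := pvAFlush result pending quote
      pvAGo rest (result ++ [c]) quote false pending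
    else if c = '\\' then
      let (result, pending) := pvAFlush result pending quote
      pvAGo rest (result ++ [c]) quote true pending
    else if c = '\'' ∨ c = '"' then
      let (result, pending) := pvAFlush result pending quote
      let quote := if quote = none then some c else if quote = some c then none else quote
      pvAGo rest (result ++ [c]) quote false pending
    else if quote = none ∧ PySem.Chars.isspace c then
      pvAGo rest result quote false (!result.isEmpty)
    else
      let (result, pending) := pvAFlush result pending quote
      pvAGo rest (result ++ [c]) quote false pending

def normalize_whitespace_outside_quotes_py (value : String) : String :=
  let text := if value = "" then "" else value   -- str(value or "")
  PySem.Str.strip (String.mk (pvAGo text.toList [] none false false))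

-- ===== PORT B =====
-- "if cur: chunks.append(''.join(cur))"
def pvBClose (chunks : List (List Char)) (cur : List Char) : List (List Char) :=
  if cur.isEmpty then chunks else chunks ++ [cur]

-- Source B's while-loop: index walk, the backslash branch consumes two characters
def pvBGo : List Char → Option Char → List Char → List (List Char) → List (List Char)
  | [], _, cur, chunks => pvBClose chunks cur
  | c :: rest, quote, cur, chunks =>
    if quote = none ∧ PySem.Chars.isspace c then
      pvBGo rest quote [] (pvBClose chunks cur)
    else if c = '\\' then
      match rest with
      | d :: rest' => pvBGo rest' quote (cur ++ [c, d]) chunks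
      | [] => pvBGo [] quote (cur ++ [c]) chunks
    else
      let quote' := if c = '\'' ∨ c = '"' then
          (if quote = none then some c else if quote = some c then none else quote)
        else quote
      pvBGo rest quote' (cur ++ [c]) chunks

def normalize_whitespace_outside_quotes_py_alt (value : String) : String :=
  let text := if value = "" then "" else value   -- str(value or "")
  PySem.Str.strip (String.mk (PySem.Chars.join [' '] (pvBGo text.toList none [] [])))

-- ===== PRECONDITION & SPEC =====
def Spec_normalize_whitespace_outside_quotes_py (value : String) (out : String) : Prop := out = normalize_whitespace_outside_quotes_py_alt value
instance (value : String) (out : String) : Decidable (Spec_normalize_whitespace_outside_quotes_py value out) := by unfold Spec_normalize_whitespace_outside_quotes_py; infer_instance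

-- ===== CLAIM (what is proved, stated in full; the proofs are below) =====
def Claim_equal_normalize_whitespace_outside_quotes_py : Prop := ∀ (value : String), Dom_normalize_whitespace_outside_quotes_py value → Spec_normalize_whitespace_outside_quotes_py value (normalize_whitespace_outside_quotes_py value)

-- ===== LEMMAS AND PROOFS =====

lemma pv_join_snoc (l : List (List Char)) (x : List Char) (h : l ≠ []) :
    PySem.Chars.join [' '] (l ++ [x]) = PySem.Chars.join [' '] l ++ ' ' :: x := by
  induction l with
  | nil => simp at h
  | cons a t ih =>
    cases t with
    | nil => simp [PySem.Chars.join_singleton, PySem.Chars.join_cons_cons]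
    | cons b t' =>
      simp only [List.cons_append]
      rw [PySem.Chars.join_cons_cons, PySem.Chars.join_cons_cons]
      have h2 := ih (by simp)
      simp only [List.cons_append] at h2
      rw [h2]
      simp [List.append_assoc]

lemma pv_join_ne_nil (l : List (List Char)) (h : l ≠ []) (hch : [] ∉ l) :
    PySem.Chars.join [' '] l ≠ [] := by
  induction l with
  | nil => simp at h
  | cons a t ih =>
    cases t with
    | nil =>
      simp [PySem.Chars.join_singleton]
      intro hc; exact hch (by simp [hc])
    | cons b t' =>
      rw [PySem.Chars.join_cons_cons]
      intro hc
      rcases List.append_eq_nil_iff.mp hc with ⟨h1, h2⟩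
      exact hch (by simp_all)

-- flushed result followed by appended content xs = join of chunks with xs glued to cur
lemma pv_out_flush (chunks : List (List Char)) (cur xs : List Char) (hxs : xs ≠ [])
    (hch : [] ∉ chunks) :
    PySem.Chars.join [' '] (pvBClose chunks cur) ++
      (if cur.isEmpty && !chunks.isEmpty then [' '] else []) ++ xs
    = PySem.Chars.join [' '] (pvBClose chunks (cur ++ xs)) := by
  by_cases hc : cur = []
  · subst hc
    by_cases hk : chunks = []
    · subst hk
      simp [pvBClose, hxs, PySem.Chars.join_singleton, PySem.Chars.join_nil]
    · simp [pvBClose, hxs, hk, List.isEmpty_iff, pv_join_snoc chunks xs hk]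
  · have h2 : cur ++ xs ≠ [] := by simp [hc]
    simp only [pvBClose, List.isEmpty_iff, hc, h2, if_false]
    by_cases hk : chunks = []
    · subst hk
      simp [PySem.Chars.join_singleton]
    · rw [pv_join_snoc chunks cur hk, pv_join_snoc chunks (cur ++ xs) hk]
      simp [hc]

-- pvAFlush evaluated at the invariant state
lemma pv_flush_eval (chunks : List (List Char)) (cur : List Char) (q : Option Char)
    (hch : [] ∉ chunks) (hq : cur = [] → q = none) :
    pvAFlush (PySem.Chars.join [' '] (pvBClose chunks cur)) (cur.isEmpty && !chunks.isEmpty) q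
    = (PySem.Chars.join [' '] (pvBClose chunks cur) ++
        (if cur.isEmpty && !chunks.isEmpty then [' '] else []), false) := by
  unfold pvAFlush
  by_cases hc : cur = []
  · subst hc
    by_cases hk : chunks = []
    · simp [hk, pvBClose]
    · have hres : PySem.Chars.join [' '] (pvBClose chunks []) ≠ [] := by
        simpa [pvBClose] using pv_join_ne_nil chunks hk hch
      simp [hk, List.isEmpty_iff, hq rfl, hres]
  · simp [hc, List.isEmpty_iff]

lemma pv_close_ne_nil_mem (chunks : List (List Char)) (cur : List Char) (hch : [] ∉ chunks) :
    [] ∉ pvBClose chunks cur := by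
  unfold pvBClose
  by_cases hc : cur.isEmpty
  · simpa [hc] using hch
  · simp [hc, hch]
    exact fun h => hc (by simp [h])

-- the main loop invariant: A's state machine tracks B's (chunks, cur) decomposition
lemma pv_main (l : List Char) (quote : Option Char) (cur : List Char)
    (chunks : List (List Char)) (hq : cur = [] → quote = none) (hch : [] ∉ chunks) :
    pvAGo l (PySem.Chars.join [' '] (pvBClose chunks cur)) quote false
      (cur.isEmpty && !chunks.isEmpty)
    = PySem.Chars.join [' '] (pvBGo l quote cur chunks) := by
  fun_induction pvBGo l quote cur chunks with
  | case1 quote cur chunks => simp [pvAGo]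
  | case2 c rest quote cur chunks hsp ih =>
    -- separator: quote = none ∧ isspace c
    obtain ⟨hqn, hspc⟩ := hsp
    have hbs : c ≠ '\\' := by rintro rfl; simp [PySem.Chars.isspace] at hspc
    have hq1 : c ≠ '\'' := by rintro rfl; simp [PySem.Chars.isspace] at hspc
    have hq2 : c ≠ '"' := by rintro rfl; simp [PySem.Chars.isspace] at hspc
    rw [pvAGo, if_neg (show ¬ (false = true) by simp), if_neg hbs,
      if_neg (show ¬ (c = '\'' ∨ c = '"') by tauto),
      if_pos (⟨hqn, hspc⟩ : quote = none ∧ PySem.Chars.isspace c = true)]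
    have hpend : (!(PySem.Chars.join [' '] (pvBClose chunks cur)).isEmpty)
        = ((List.isEmpty ([] : List Char)) && !(pvBClose chunks cur).isEmpty) := by
      by_cases hk : pvBClose chunks cur = []
      · simp [hk, PySem.Chars.join_nil]
      · have hne := pv_join_ne_nil _ hk (pv_close_ne_nil_mem chunks cur hch)
        have e1 : (PySem.Chars.join [' '] (pvBClose chunks cur)).isEmpty = false := by
          cases h' : PySem.Chars.join [' '] (pvBClose chunks cur) with
          | nil => exact absurd h' hne
          | cons _ _ => rfl
        have e2 : (pvBClose chunks cur).isEmpty = false := by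
          cases h' : pvBClose chunks cur with
          | nil => exact absurd h' hk
          | cons _ _ => rfl
        rw [e1, e2]; rfl
    rw [hpend]
    have hmain := ih (fun _ => hqn) (pv_close_ne_nil_mem chunks cur hch)
    simpa [pvBClose] using hmain
  | case3 quote cur chunks d rest' hsp ih =>
    -- backslash with a following char: A takes two steps (escape set, then escaped char)
    rw [pvAGo, if_neg (show ¬ (false = true) by simp), if_pos rfl]
    simp only [pv_flush_eval chunks cur quote hch hq]
    rw [pvAGo, if_pos (rfl : (true : Bool) = true)]
    simp only [pvAFlush, Bool.false_and, Bool.false_eq_true, if_false]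
    have hout := pv_out_flush chunks cur ['\\', d] (by simp) hch
    have hres : ((PySem.Chars.join [' '] (pvBClose chunks cur) ++
        (if cur.isEmpty && !chunks.isEmpty then [' '] else [])) ++ ['\\']) ++ [d]
        = PySem.Chars.join [' '] (pvBClose chunks (cur ++ ['\\', d])) := by
      rw [← hout]; simp
    rw [hres]
    have hmain := ih (by simp) hch
    have he : (cur ++ ['\\', d]).isEmpty = false := by cases cur <;> rfl
    simpa [he] using hmain
  | case4 quote cur chunks hsp ih =>
    -- trailing backslash: A appends it, sets escaped, loop ends
    rw [pvAGo, if_neg (show ¬ (false = true) by simp), if_pos rfl]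
    simp only [pv_flush_eval chunks cur quote hch hq]
    rw [pvAGo]
    rw [pv_out_flush chunks cur ['\\'] (by simp) hch]
    simp [pvBGo]
  | case5 c rest quote cur chunks hsp hbs quote' ih =>
    -- quote characters and ordinary characters: flush and append
    rw [pvAGo, if_neg (show ¬ (false = true) by simp), if_neg hbs]
    have hmain := ih (by simp) hch
    simp only [quote'] at hmain
    by_cases hqc : c = '\'' ∨ c = '"'
    · rw [if_pos hqc]
      simp only [pv_flush_eval chunks cur quote hch hq]
      rw [pv_out_flush chunks cur [c] (by simp) hch]
      simp only [hqc, if_true] at hmain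
      simp only [quote', hqc, if_true]
      have he : (cur ++ [c]).isEmpty = false := by cases cur <;> rfl
      simpa [he] using hmain
    · rw [if_neg hqc, if_neg hsp]
      simp only [pv_flush_eval chunks cur quote hch hq]
      rw [pv_out_flush chunks cur [c] (by simp) hch]
      simp only [hqc, if_false] at hmain
      simp only [quote', hqc, if_false]
      have he : (cur ++ [c]).isEmpty = false := by cases cur <;> rfl
      simpa [he] using hmain

-- ===== VERDICT (by name: the statement is the Claim_ definition above) =====
theorem normalize_whitespace_outside_quotes_py_spec : Claim_equal_normalize_whitespace_outside_quotes_py := by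
  intro value _
  unfold Spec_normalize_whitespace_outside_quotes_py
  show PySem.Str.strip (String.mk
      (pvAGo (if value = "" then "" else value).toList [] none false false))
    = PySem.Str.strip (String.mk
      (PySem.Chars.join [' '] (pvBGo (if value = "" then "" else value).toList none [] [])))
  have h := pv_main (if value = "" then "" else value).toList none [] [] (fun _ => rfl) (by simp)
  simp only [pvBClose, List.isEmpty_nil, if_true, PySem.Chars.join_nil, Bool.not_true,
    Bool.and_false] at h
  rw [h]
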